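-- pv_equiv track=rewrite | github.com/lovepettersson/DelayedDecoder | HybridDelayedMeasDecoderFixedMeasPatt.py | filter_anticom_strats_TBH
-- ===== SOURCE A (Python) =====
-- def filter_anticom_strats_TBH(strats, meas_before_qbt_and_pauli, num_qbts=11):
--     meas_before = []
--     meas_pauli = {}
--     for outcome in meas_before_qbt_and_pauli:
--         qbt, pauli = outcome
--         meas_pauli[qbt] = pauli
--         meas_before.append(qbt)
--     pauli_op = []
--     for qbt in range(num_qbts):
--         if qbt not in meas_before:
--             pauli_op.append("I")
--         else:
--             pauli_op.append(meas_pauli[qbt])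
--     new_strats = []
--     for strat in strats:
--         pauli_op_check = strat[3]
--         flag = True
--         for qbt in range(num_qbts):
--             commute_val = single_qubit_commute(pauli_op, pauli_op_check, qbt)
--             if commute_val != 0:
--                 flag = False
--         if flag:
--             new_strats.append(strat)
--     return new_strats
--
-- def single_qubit_commute(pauli1, pauli2, qbt):
--     """
--     Returns 0 if the operators on the qbt-th qubit of the two operators in the Pauli group commute,
--     and 1 if they anticommute.
--     """
--     if pauli1[qbt] == 'I' or pauli2[qbt] == 'I' or pauli1[qbt] == pauli2[qbt]:
--         return 0
--     else:
--         return 1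
-- ===== SOURCE B (Python) =====
-- def filter_anticom_strats_TBH(strats, meas_before_qbt_and_pauli, num_qbts=11):
--     meas_pauli = {}
--     for qbt, pauli in meas_before_qbt_and_pauli:
--         meas_pauli[qbt] = pauli
--     checks = [(q, p) for q, p in meas_pauli.items()
--               if 0 <= q < num_qbts and p != "I"]
--     new_strats = []
--     for strat in strats:
--         row = strat[3]
--         if all(row[q] == "I" or row[q] == p for q, p in checks):
--             new_strats.append(strat)
--     return new_strats
-- ===== Notes on version B (the rewrite author's own statement) =====
-- stated objective: alternative
-- what changed: B drops A's meas_before list and padded length-num_qbts pauli_op entirely: it builds the qubit->pauli dict in one pass, filters its items once into the relevant (qubit, pauli) checks, and tests each strat only at those measured positions with all() instead of scanning the full range(num_qbts) per strat.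
import Mathlib
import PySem

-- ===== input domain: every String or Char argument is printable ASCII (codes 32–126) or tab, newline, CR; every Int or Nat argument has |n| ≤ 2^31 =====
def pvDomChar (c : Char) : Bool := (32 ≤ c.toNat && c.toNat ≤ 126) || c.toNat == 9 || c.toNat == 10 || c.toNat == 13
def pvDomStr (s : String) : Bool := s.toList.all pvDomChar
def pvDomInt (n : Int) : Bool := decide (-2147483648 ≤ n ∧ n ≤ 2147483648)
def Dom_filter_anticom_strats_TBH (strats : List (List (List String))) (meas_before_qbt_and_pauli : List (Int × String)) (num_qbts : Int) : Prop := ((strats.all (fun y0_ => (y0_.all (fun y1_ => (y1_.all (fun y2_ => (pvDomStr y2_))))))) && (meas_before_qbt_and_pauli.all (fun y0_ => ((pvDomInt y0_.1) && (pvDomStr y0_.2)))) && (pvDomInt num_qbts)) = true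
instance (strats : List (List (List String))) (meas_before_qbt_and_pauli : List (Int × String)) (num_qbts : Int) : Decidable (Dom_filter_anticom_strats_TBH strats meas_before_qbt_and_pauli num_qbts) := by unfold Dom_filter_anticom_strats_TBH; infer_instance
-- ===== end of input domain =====

-- B replaces A's padded pauli_op list and full range(num_qbts) scan per strat by a dict of
-- measured qubits filtered once into 'checks', testing only those positions (objective: alternative).


-- ===== PORT A =====
-- literal port of single_qubit_commute; the pyGetD defaults stand for Python's IndexError,
-- which Pre_ excludes (pauli1's index is always in range where A is run below)
def single_qubit_commute (pauli1 pauli2 : List String) (qbt : Int) : Int :=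
  if PySem.List.pyGetD pauli1 qbt "" = "I" ∨ PySem.List.pyGetD pauli2 qbt "" = "I"
      ∨ PySem.List.pyGetD pauli1 qbt "" = PySem.List.pyGetD pauli2 qbt "" then 0 else 1

def filter_anticom_strats_TBH (strats : List (List (List String))) (meas_before_qbt_and_pauli : List (Int × String)) (num_qbts : Int) : List (List (List String)) :=
  -- meas_before / meas_pauli loop (one pass, two accumulators)
  let st := meas_before_qbt_and_pauli.foldl
    (fun (st : List Int × PySem.Dict Int String) outcome =>
      (st.1 ++ [outcome.1], st.2.insert outcome.1 outcome.2))
    ([], PySem.Dict.empty)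
  let meas_before := st.1
  let meas_pauli := st.2
  -- pauli_op loop; meas_pauli[qbt] cannot raise KeyError (qbt ∈ meas_before), getD "" is exact
  let pauli_op := (PySem.List.pyRange 0 num_qbts 1).foldl
    (fun acc qbt => if qbt ∉ meas_before then acc ++ ["I"] else acc ++ [meas_pauli.getD qbt ""]) []
  -- filtering loop
  strats.foldl
    (fun new_strats strat =>
      let pauli_op_check := PySem.List.pyGetD strat 3 []   -- strat[3]; in range by Pre_
      let flag := (PySem.List.pyRange 0 num_qbts 1).foldl
        (fun flag qbt => if single_qubit_commute pauli_op pauli_op_check qbt ≠ 0 then false else flag)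
        true
      if flag then new_strats ++ [strat] else new_strats)
    []

-- ===== PORT B =====
def filter_anticom_strats_TBH_alt (strats : List (List (List String))) (meas_before_qbt_and_pauli : List (Int × String)) (num_qbts : Int) : List (List (List String)) :=
  let meas_pauli := meas_before_qbt_and_pauli.foldl
    (fun (d : PySem.Dict Int String) p => d.insert p.1 p.2) PySem.Dict.empty
  let checks := meas_pauli.items.filter
    (fun qp => decide (0 ≤ qp.1) && decide (qp.1 < num_qbts) && (qp.2 != "I"))
  strats.filter (fun strat =>
    let row := PySem.List.pyGetD strat 3 []   -- strat[3]; in range by Pre_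
    checks.all (fun qp =>
      (PySem.List.pyGetD row qp.1 "" == "I") || (PySem.List.pyGetD row qp.1 "" == qp.2)))

-- ===== PRECONDITION & SPEC =====
-- last Pauli recorded for qubit q in the measurement list (later duplicates overwrite earlier)
def pvLastPauli (mb : List (Int × String)) (q : Int) : Option String :=
  mb.foldl (fun acc p => if p.1 = q then some p.2 else acc) none

-- Pre_ excludes exactly the inputs where the Python A raises IndexError: a strat shorter than 4,
-- or a measured qubit q in [0, num_qbts) whose (last) measured Pauli is not "I" with strat[3] too short.
def Pre_filter_anticom_strats_TBH (strats : List (List (List String))) (meas_before_qbt_and_pauli : List (Int × String)) (num_qbts : Int) : Prop :=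
  ∀ strat ∈ strats, 3 < strat.length ∧
    ∀ qp ∈ meas_before_qbt_and_pauli,
      0 ≤ qp.1 → qp.1 < num_qbts → pvLastPauli meas_before_qbt_and_pauli qp.1 ≠ some "I" →
        qp.1 < ((PySem.List.pyGetD strat 3 []).length : Int)
instance (strats : List (List (List String))) (meas_before_qbt_and_pauli : List (Int × String)) (num_qbts : Int) : Decidable (Pre_filter_anticom_strats_TBH strats meas_before_qbt_and_pauli num_qbts) := by unfold Pre_filter_anticom_strats_TBH; infer_instance

def pvWitness_filter_anticom_strats_TBH : List (List (List String)) × (List (Int × String)) × Int :=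
  ([[["a"], [], [], ["X", "I", "Z"]], [[], [], [], ["Y", "Y", "Z"]]], [(0, "X"), (2, "Z"), (0, "X")], 3)

def Spec_filter_anticom_strats_TBH (strats : List (List (List String))) (meas_before_qbt_and_pauli : List (Int × String)) (num_qbts : Int) (out : List (List (List String))) : Prop := out = filter_anticom_strats_TBH_alt strats meas_before_qbt_and_pauli num_qbts
instance (strats : List (List (List String))) (meas_before_qbt_and_pauli : List (Int × String)) (num_qbts : Int) (out : List (List (List String))) : Decidable (Spec_filter_anticom_strats_TBH strats meas_before_qbt_and_pauli num_qbts out) := by unfold Spec_filter_anticom_strats_TBH; infer_instance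

-- ===== CLAIM (what is proved, stated in full; the proofs are below) =====
def Claim_equal_filter_anticom_strats_TBH : Prop := ∀ (strats : List (List (List String))) (meas_before_qbt_and_pauli : List (Int × String)) (num_qbts : Int), Dom_filter_anticom_strats_TBH strats meas_before_qbt_and_pauli num_qbts → Pre_filter_anticom_strats_TBH strats meas_before_qbt_and_pauli num_qbts → Spec_filter_anticom_strats_TBH strats meas_before_qbt_and_pauli num_qbts (filter_anticom_strats_TBH strats meas_before_qbt_and_pauli num_qbts)

-- ===== LEMMAS AND PROOFS =====

-- the dict lookup after A's/B's building loop is the last recorded Pauli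
theorem get?_dictFold (mb : List (Int × String)) (d : PySem.Dict Int String) (q : Int) :
    (mb.foldl (fun d p => d.insert p.1 p.2) d).get? q
      = mb.foldl (fun acc p => if p.1 = q then some p.2 else acc) (d.get? q) := by
  induction mb generalizing d with
  | nil => rfl
  | cons a mb ih =>
      simp only [List.foldl_cons, ih, PySem.Dict.get?_insert]
      by_cases h : a.1 = q
      · simp [h]
      · simp [h, Ne.symm h]

theorem lastVal_none_iff (mb : List (Int × String)) (q : Int) (acc : Option String) :
    mb.foldl (fun acc p => if p.1 = q then some p.2 else acc) acc = none
      ↔ acc = none ∧ q ∉ mb.map Prod.fst := by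
  induction mb generalizing acc with
  | nil => simp
  | cons a mb ih =>
      simp only [List.foldl_cons, ih, List.map_cons, List.mem_cons]
      by_cases h : a.1 = q
      · simp [h]
      · simp only [h, if_false]
        constructor
        · rintro ⟨h1, h2⟩; exact ⟨h1, by rintro (rfl | hq) <;> [exact h rfl; exact h2 hq]⟩
        · rintro ⟨h1, h2⟩; exact ⟨h1, fun hq => h2 (Or.inr hq)⟩

theorem lastPauli_of_mem (mb : List (Int × String)) (q : Int) (h : q ∈ mb.map Prod.fst) :
    ∃ p, pvLastPauli mb q = some p := by
  cases heq : pvLastPauli mb q with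
  | none => exact absurd ((lastVal_none_iff mb q none).mp heq).2 (not_not.mpr h)
  | some p => exact ⟨p, rfl⟩

theorem mem_of_lastPauli (mb : List (Int × String)) (q : Int) (p : String)
    (h : pvLastPauli mb q = some p) : q ∈ mb.map Prod.fst := by
  by_contra hq
  have hn := (lastVal_none_iff mb q none).mpr ⟨rfl, hq⟩
  rw [pvLastPauli] at h; rw [hn] at h; cases h

theorem get?_measDict (mb : List (Int × String)) (q : Int) :
    (mb.foldl (fun d p => d.insert p.1 p.2) PySem.Dict.empty).get? q = pvLastPauli mb q := by
  rw [get?_dictFold, PySem.Dict.get?_empty]; rfl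

theorem nodup_measDict (mb : List (Int × String)) :
    (mb.foldl (fun d p => d.insert p.1 p.2) PySem.Dict.empty).keys.Nodup :=
  PySem.Dict.nodup_keys_foldl_insert_key mb Prod.fst (fun _ p => p.2) PySem.Dict.empty
    (by simp [PySem.Dict.keys_empty])

-- pauli_op entry at position q (proof-side characterisation of A's padded list)
def pvG (mb : List (Int × String)) (q : Int) : String :=
  if q ∉ mb.map (fun e => e.1) then "I"
  else (mb.foldl (fun d e => d.insert e.1 e.2) PySem.Dict.empty).getD q ""

theorem pvG_of_last (mb : List (Int × String)) (q : Int) (p : String)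
    (h : pvLastPauli mb q = some p) : pvG mb q = p := by
  have hm : q ∈ mb.map (fun e => e.1) := mem_of_lastPauli mb q p h
  unfold pvG
  rw [if_neg (not_not.mpr hm), PySem.Dict.getD_eq_get?_getD, get?_measDict, h]
  rfl

-- the per-strat keep test of A equals that of B
theorem keep_iff (mb : List (Int × String)) (n : Int) (row : List String) :
    ((PySem.List.pyRange 0 n 1).all fun q =>
        single_qubit_commute ((PySem.List.pyRange 0 n 1).map (pvG mb)) row q == 0)
      = (((mb.foldl (fun d p => d.insert p.1 p.2) PySem.Dict.empty).items.filter
            (fun qp => decide (0 ≤ qp.1) && decide (qp.1 < n) && qp.2 != "I")).all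
          fun qp => (PySem.List.pyGetD row qp.1 "" == "I")
            || (PySem.List.pyGetD row qp.1 "" == qp.2)) := by
  rw [Bool.eq_iff_iff, List.all_eq_true, List.all_eq_true]
  constructor
  · intro h qp hqp
    rw [List.mem_filter] at hqp
    obtain ⟨hi, hcond⟩ := hqp
    simp only [Bool.and_eq_true, decide_eq_true_eq, bne_iff_ne] at hcond
    have hlast : pvLastPauli mb qp.1 = some qp.2 := by
      rw [← get?_measDict]
      exact PySem.Dict.get?_of_mem_items _ hi (nodup_measDict mb)
    have hq := h qp.1 (by rw [PySem.List.mem_pyRange_one]; exact ⟨hcond.1.1, hcond.1.2⟩)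
    unfold single_qubit_commute at hq
    rw [PySem.List.pyGetD_map_pyRange_of_nonneg _ _ _ _ hcond.1.1 hcond.1.2,
        pvG_of_last mb qp.1 qp.2 hlast] at hq
    split_ifs at hq with hC
    · rcases hC with h1 | h2 | h3
      · exact absurd h1 hcond.2
      · simp [h2]
      · simp [h3.symm]
    · simp at hq
  · intro h q hq
    rw [PySem.List.mem_pyRange_one] at hq
    unfold single_qubit_commute
    rw [PySem.List.pyGetD_map_pyRange_of_nonneg _ _ _ _ hq.1 hq.2]
    by_cases hmem : q ∈ mb.map (fun e => e.1)
    · obtain ⟨p, hp⟩ := lastPauli_of_mem mb q (by simpa using hmem)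
      rw [pvG_of_last mb q p hp]
      by_cases hpI : p = "I"
      · simp [hpI]
      · have hget : (mb.foldl (fun d e => d.insert e.1 e.2) PySem.Dict.empty).get? q = some p := by
          rw [get?_measDict]; exact hp
        have hitems := PySem.Dict.mem_items_of_get?_eq_some _ hget
        have hb := h (q, p) (List.mem_filter.mpr ⟨hitems, by simp [hq.1, hq.2, hpI]⟩)
        simp only [Bool.or_eq_true, beq_iff_eq] at hb
        rcases hb with h1 | h2
        · simp [h1]
        · simp [h2]
    · unfold pvG
      rw [if_pos hmem]
      simp

-- A's inner flag loop is an 'all' over the range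
theorem foldl_flag (l : List Int) (c : Int → Int) (b : Bool) :
    l.foldl (fun flag q => if c q ≠ 0 then false else flag) b
      = (b && l.all fun q => c q == 0) := by
  induction l generalizing b with
  | nil => simp
  | cons a l ih =>
      rw [List.foldl_cons, ih, List.all_cons]
      by_cases h : c a = 0 <;> simp [h]

-- ===== VERDICT (by name: the statement is the Claim_ definition above) =====
theorem filter_anticom_strats_TBH_spec : Claim_equal_filter_anticom_strats_TBH := by
  intro strats mb n _dom hpre
  unfold Spec_filter_anticom_strats_TBH
  simp only [filter_anticom_strats_TBH, filter_anticom_strats_TBH_alt]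
  rw [PySem.List.foldl_prod_mk (f := fun (a : List Int) (e : Int × String) => a ++ [e.1])
        (g := fun (d : PySem.Dict Int String) (e : Int × String) => d.insert e.1 e.2)]
  dsimp only
  rw [PySem.List.foldl_append_singleton_eq_map (f := fun (e : Int × String) => e.1), List.nil_append]
  have hpauli : (PySem.List.pyRange 0 n 1).foldl
      (fun acc qbt => if qbt ∉ mb.map (fun e => e.1) then acc ++ ["I"]
        else acc ++ [(mb.foldl (fun d e => d.insert e.1 e.2) PySem.Dict.empty).getD qbt ""]) []
      = (PySem.List.pyRange 0 n 1).map (pvG mb) := by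
    rw [PySem.List.foldl_congr_mem' _ _ (fun acc q => acc ++ [pvG mb q]) _
        (fun x _ acc => by dsimp only [pvG]; split_ifs <;> rfl)]
    rw [PySem.List.foldl_append_singleton_eq_map, List.nil_append]
  rw [hpauli, PySem.List.foldl_append_ite_eq_filter, List.nil_append]
  apply List.filter_congr
  intro strat _hstrat
  dsimp only
  rw [foldl_flag, Bool.true_and]
  simp only [Bool.decide_eq_true]
  exact keep_iff mb n (PySem.List.pyGetD strat 3 [])
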